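-- pv_equiv track=rewrite | github.com/RuthvikManyam/code | bs/easy/74. Search a 2D Matrix/ans.py | bsu
-- ===== SOURCE A (Python) =====
-- def bsu(nums,low,high,target):
--     while low<high:
--         m=low+(high-low)//2
--         if nums[m][-1]==target:
--             return m
--         elif nums[m][-1]<target:
--             low=m+1
--         else:
--             high=m
--     return high
-- ===== SOURCE B (Python) =====
-- def bsu(nums, low, high, target):
--     if low >= high:
--         return high
--     m = low + (high - low) // 2
--     e = nums[m][-1]
--     if e == target:
--         return m
--     if e < target:
--         return bsu(nums, m + 1, high, target)
--     return bsu(nums, low, m, target)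
-- ===== Notes on version B (the rewrite author's own statement) =====
-- stated objective: alternative
-- what changed: The iterative while-loop binary search is re-decomposed as a direct recursion with an early base-case return, probing the same midpoint sequence.
-- outside the precondition, e.g. on bsu([[], [5]], 0, 2, 5): A returns 1, B returns 1
import Mathlib
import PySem

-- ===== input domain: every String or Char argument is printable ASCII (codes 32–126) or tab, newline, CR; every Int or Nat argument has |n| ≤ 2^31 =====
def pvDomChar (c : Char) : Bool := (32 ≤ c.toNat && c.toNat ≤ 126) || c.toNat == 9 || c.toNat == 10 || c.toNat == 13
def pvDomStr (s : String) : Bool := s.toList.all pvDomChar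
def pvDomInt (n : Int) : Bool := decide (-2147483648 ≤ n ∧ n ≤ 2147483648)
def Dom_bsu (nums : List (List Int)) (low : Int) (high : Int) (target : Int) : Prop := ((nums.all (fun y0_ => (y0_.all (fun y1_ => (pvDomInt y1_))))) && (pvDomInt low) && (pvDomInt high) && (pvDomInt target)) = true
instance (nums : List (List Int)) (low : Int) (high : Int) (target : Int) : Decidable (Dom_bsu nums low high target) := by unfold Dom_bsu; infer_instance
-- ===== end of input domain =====

-- B re-decomposes A's iterative while-loop binary search as a direct recursion with an
-- early base-case return; same midpoint sequence, same early return on equality.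

-- ===== PORT A =====
-- A's while-loop as a tail-recursive loop helper over the mutable state (low, high).
-- nums[m][-1] is ported with PySem.List.pyGet?; the `none` (IndexError) branches return 0
-- and are excluded by Pre_bsu.
def bsuLoopA (nums : List (List Int)) (target : Int) (low high : Int) : Int :=
  if _h : low < high then
    let m := low + PySem.Int.floordiv (high - low) 2
    match PySem.List.pyGet? nums m with
    | none => 0
    | some row =>
      match PySem.List.pyGet? row (-1) with
      | none => 0
      | some v =>
        if v = target then m
        else if v < target then bsuLoopA nums target (m + 1) high
        else bsuLoopA nums target low m
  else high
termination_by (high - low).toNat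
decreasing_by
  all_goals
    simp only [PySem.Int.floordiv_eq_ediv_of_pos (by omega : (0:Int) < 2)]
    omega

def bsu (nums : List (List Int)) (low : Int) (high : Int) (target : Int) : Int :=
  bsuLoopA nums target low high

-- ===== PORT B =====
-- direct recursion, base case first (Source B); the `none` (IndexError) case returns 0, excluded by Pre_bsu.
def bsu_alt (nums : List (List Int)) (low : Int) (high : Int) (target : Int) : Int :=
  if _h : high ≤ low then high
  else
    let m := low + PySem.Int.floordiv (high - low) 2
    match (PySem.List.pyGet? nums m).bind (fun row => PySem.List.pyGet? row (-1)) with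
    | none => 0
    | some e =>
      if e = target then m
      else if e < target then bsu_alt nums (m + 1) high target
      else bsu_alt nums low m target
termination_by (high - low).toNat
decreasing_by
  all_goals
    simp only [PySem.Int.floordiv_eq_ediv_of_pos (by omega : (0:Int) < 2)]
    omega

-- ===== PRECONDITION & SPEC =====
-- Pre_bsu excludes the calls on which nums[m][-1] can raise an IndexError: when the loop runs
-- at all (low < high), every index of the window [low, high) must be a valid Python index of
-- nums (possibly via negative-index wraparound) with a nonempty row; it excludes a few inputs
-- where an invalid window index happens never to be probed and A still returns (cited).
def Pre_bsu (nums : List (List Int)) (low : Int) (high : Int) (target : Int) : Prop :=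
  low < high →
    (-(nums.length : Int) ≤ low ∧ high ≤ nums.length ∧
      ∀ i : Nat, i < nums.length →
        ((low ≤ (i : Int) ∧ (i : Int) < high) ∨
         (low ≤ (i : Int) - nums.length ∧ (i : Int) - nums.length < high)) →
        nums.getD i [] ≠ [])
instance (nums : List (List Int)) (low : Int) (high : Int) (target : Int) : Decidable (Pre_bsu nums low high target) := by unfold Pre_bsu; infer_instance

def pvWitness_bsu : List (List Int) × Int × Int × Int := ([[3], [5], [9]], 0, 3, 5)

def Spec_bsu (nums : List (List Int)) (low : Int) (high : Int) (target : Int) (out : Int) : Prop := out = bsu_alt nums low high target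
instance (nums : List (List Int)) (low : Int) (high : Int) (target : Int) (out : Int) : Decidable (Spec_bsu nums low high target out) := by unfold Spec_bsu; infer_instance

-- ===== CLAIM (what is proved, stated in full; the proofs are below) =====
def Claim_equal_bsu : Prop := ∀ (nums : List (List Int)) (low : Int) (high : Int) (target : Int), Dom_bsu nums low high target → Pre_bsu nums low high target → Spec_bsu nums low high target (bsu nums low high target)

-- ===== LEMMAS AND PROOFS =====

-- The two recursions agree (unconditionally: the excluded IndexError branches also agree).
theorem bsuLoopA_eq_alt (nums : List (List Int)) (target : Int) :
    ∀ (fuel : Nat) (low high : Int), (high - low).toNat ≤ fuel →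
      bsuLoopA nums target low high = bsu_alt nums low high target := by
  intro fuel
  induction fuel with
  | zero =>
    intro low high hf
    rw [bsuLoopA, bsu_alt]
    have : ¬ low < high := by omega
    simp [this, show high ≤ low by omega]
  | succ n ih =>
    intro low high hf
    rw [bsuLoopA, bsu_alt]
    by_cases h : low < high
    · simp only [h, dif_pos, show ¬ high ≤ low by omega, dif_neg, not_false_iff]
      have hm : low ≤ low + PySem.Int.floordiv (high - low) 2 ∧
          low + PySem.Int.floordiv (high - low) 2 < high := by
        rw [PySem.Int.floordiv_eq_ediv_of_pos (by omega : (0:Int) < 2)]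
        omega
      cases hrow : PySem.List.pyGet? nums (low + PySem.Int.floordiv (high - low) 2) with
      | none => simp [hrow]
      | some row =>
        cases hv : PySem.List.pyGet? row (-1) with
        | none => simp [hrow, hv]
        | some v =>
          simp only [hrow, hv, Option.bind_some]
          by_cases hvt : v = target
          · simp [hvt]
          · by_cases hlt : v < target
            · simp only [hvt, if_neg, hlt, if_pos, not_false_iff]
              exact ih _ _ (by rw [PySem.Int.floordiv_eq_ediv_of_pos (by omega : (0:Int) < 2)] at hm ⊢; omega)
            · simp only [hvt, if_neg, hlt, not_false_iff]
              exact ih _ _ (by rw [PySem.Int.floordiv_eq_ediv_of_pos (by omega : (0:Int) < 2)] at hm ⊢; omega)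
    · simp [h, show high ≤ low by omega]

-- ===== VERDICT (by name: the statement is the Claim_ definition above) =====
theorem bsu_spec : Claim_equal_bsu := by
  intro nums low high target _hdom _hpre
  unfold Spec_bsu bsu
  exact bsuLoopA_eq_alt nums target (high - low).toNat low high le_rfl
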